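-- pv_equiv track=rewrite | github.com/MrBrantCode/unitest_baseline | mut_generate/mist_train_taco/taco_6386/solution.py | calculate_max_total_score
-- ===== SOURCE A (Python) =====
-- from collections import deque
--
-- def calculate_max_total_score(N, M, K, A):
--     dp = [0] * (N + 1)
--     for j in range(K):
--         newDP = [0] * (N + 1)
--         que = deque()
--         for i in range(j, N - K + j + 1):
--             while que and que[-1][0] < dp[i]:
--                 que.pop()
--             que.append((dp[i], i))
--             while que and que[0][1] <= i - M:
--                 que.popleft()
--             newDP[i + 1] = que[0][0] + (j + 1) * A[i]
--         dp = newDP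
--     return max(dp)
-- ===== SOURCE B (Python) =====
-- def calculate_max_total_score(N, M, K, A):
--     dp = [0] * (N + 1)
--     for j in range(K):
--         mid = [max(dp[max(j, i - M + 1):i + 1]) + (j + 1) * A[i]
--                for i in range(j, N - K + j + 1)]
--         newDP = [0] * (N + 1)
--         newDP[j + 1:j + 1 + len(mid)] = mid
--         dp = newDP
--     return max(dp)
-- ===== Notes on version B (the rewrite author's own statement) =====
-- stated objective: simpler
-- what changed: The deque-based monotonic sliding-window maximum is dropped; each newDP entry is computed directly as max over the slice dp[max(j, i-M+1):i+1], and each row is built as one list comprehension instead of in-place index assignments.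
import Mathlib
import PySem

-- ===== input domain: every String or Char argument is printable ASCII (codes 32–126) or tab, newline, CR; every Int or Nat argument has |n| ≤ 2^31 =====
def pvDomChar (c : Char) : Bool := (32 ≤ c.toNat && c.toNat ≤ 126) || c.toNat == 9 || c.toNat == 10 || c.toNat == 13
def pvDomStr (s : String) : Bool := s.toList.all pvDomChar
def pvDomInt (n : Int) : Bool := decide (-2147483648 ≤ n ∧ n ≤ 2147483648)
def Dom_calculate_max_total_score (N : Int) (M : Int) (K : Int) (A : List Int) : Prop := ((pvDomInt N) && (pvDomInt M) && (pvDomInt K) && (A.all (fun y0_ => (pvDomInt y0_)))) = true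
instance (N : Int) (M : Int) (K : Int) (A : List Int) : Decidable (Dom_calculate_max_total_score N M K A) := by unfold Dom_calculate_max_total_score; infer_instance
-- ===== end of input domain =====

-- B replaces A's monotonic-deque sliding-window maximum by a direct max over the slice
-- dp[max(j, i-M+1):i+1], building each DP row as one comprehension (objective: simpler).

-- ===== PORT A =====
-- ports 'while que and que[-1][0] < dp[i]: que.pop()': popping from the right while the
-- last value is < v = dropping from the front of the reversed list (exact).
def pvPopTailLt (v : Int) (que : List (Int × Int)) : List (Int × Int) :=
  ((que.reverse).dropWhile (fun p => decide (p.1 < v))).reverse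

-- one iteration of A's inner 'for i in range(j, N - K + j + 1)' loop; dp[i]/A[i] are in
-- range under Pre_, so pyGetD's default is never taken, and que is nonempty at que[0].
def pvInnerA (dp : List Int) (M : Int) (j : Int) (A : List Int)
    (st : List Int × List (Int × Int)) (i : Int) : List Int × List (Int × Int) :=
  let v := PySem.List.pyGetD dp i 0
  let que := (pvPopTailLt v st.2 ++ [(v, i)]).dropWhile (fun p => decide (p.2 ≤ i - M))
  (st.1.set (i + 1).toNat ((que.headD (0, 0)).1 + (j + 1) * PySem.List.pyGetD A i 0), que)

-- one iteration of A's outer 'for j in range(K)' loop (newDP = [0]*(N+1); inner loop; dp = newDP)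
def pvRowA (N : Int) (M : Int) (K : Int) (A : List Int) (dp : List Int) (j : Int) : List Int :=
  ((PySem.List.pyRange j (N - K + j + 1)).foldl (pvInnerA dp M j A)
    (List.replicate (N + 1).toNat 0, ([] : List (Int × Int)))).1

def calculate_max_total_score (N : Int) (M : Int) (K : Int) (A : List Int) : Int :=
  (PySem.List.max? ((PySem.List.pyRange 0 K).foldl (pvRowA N M K A)
      (List.replicate (N + 1).toNat 0)) (fun x => x)).getD 0

-- ===== PORT B =====
-- one iteration of B's 'for j in range(K)' loop: the comprehension 'mid', then the
-- slice assignment 'newDP[j+1 : j+1+len(mid)] = mid' on newDP = [0]*(N+1), which (with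
-- 0 ≤ j+1) is exactly take/replace/drop.
def pvRowB (N : Int) (M : Int) (K : Int) (A : List Int) (dp : List Int) (j : Int) : List Int :=
  let mid := (PySem.List.pyRange j (N - K + j + 1)).map (fun i =>
    (PySem.List.max? (PySem.List.slice dp (some (max j (i - M + 1))) (some (i + 1)))
        (fun x => x)).getD 0
      + (j + 1) * PySem.List.pyGetD A i 0)
  List.take (j + 1).toNat (List.replicate (N + 1).toNat 0)
    ++ mid ++ List.drop ((j + 1).toNat + mid.length) (List.replicate (N + 1).toNat 0)

def calculate_max_total_score_alt (N : Int) (M : Int) (K : Int) (A : List Int) : Int :=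
  (PySem.List.max? ((PySem.List.pyRange 0 K).foldl (pvRowB N M K A)
      (List.replicate (N + 1).toNat 0)) (fun x => x)).getD 0

-- ===== PRECONDITION & SPEC =====
-- Exactly the inputs on which A returns: N ≥ 0 (else max([]) raises ValueError), and when
-- the loops actually run (1 ≤ K ≤ N) Python needs M ≥ 1 (else que is emptied and que[0]
-- raises IndexError) and len(A) ≥ N (else A[i] raises IndexError).
def Pre_calculate_max_total_score (N : Int) (M : Int) (K : Int) (A : List Int) : Prop :=
  0 ≤ N ∧ (1 ≤ K → K ≤ N → (1 ≤ M ∧ N ≤ (A.length : Int)))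
instance (N : Int) (M : Int) (K : Int) (A : List Int) : Decidable (Pre_calculate_max_total_score N M K A) := by unfold Pre_calculate_max_total_score; infer_instance
def pvWitness_calculate_max_total_score : Int × Int × Int × List Int := (3, 2, 2, [1, 2, 3])
def Spec_calculate_max_total_score (N : Int) (M : Int) (K : Int) (A : List Int) (out : Int) : Prop := out = calculate_max_total_score_alt N M K A
instance (N : Int) (M : Int) (K : Int) (A : List Int) (out : Int) : Decidable (Spec_calculate_max_total_score N M K A out) := by unfold Spec_calculate_max_total_score; infer_instance

-- ===== CLAIM (what is proved, stated in full; the proofs are below) =====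
def Claim_equal_calculate_max_total_score : Prop := ∀ (N : Int) (M : Int) (K : Int) (A : List Int), Dom_calculate_max_total_score N M K A → Pre_calculate_max_total_score N M K A → Spec_calculate_max_total_score N M K A (calculate_max_total_score N M K A)

-- ===== LEMMAS AND PROOFS =====

-- window lower bound, window contents and window maximum (proof-side vocabulary)
def pvLo (M : Int) (j : Int) (i : Int) : Int := max j (i - M + 1)

def pvWin (dp : List Int) (M : Int) (j : Int) (i : Int) : List Int :=
  (PySem.List.pyRange (pvLo M j i) (i + 1)).map (fun t => PySem.List.pyGetD dp t 0)

def pvWMax (dp : List Int) (M : Int) (j : Int) (i : Int) : Int :=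
  (PySem.List.max? (pvWin dp M j i) (fun x => x)).getD 0

-- the deque invariant after processing index i: entries are (dp[t], t) for t in the
-- current window, values non-increasing / indices increasing front-to-back, and every
-- window index is dominated by some entry at or after it.
def pvQInv (dp : List Int) (M : Int) (j : Int) (i : Int) (que : List (Int × Int)) : Prop :=
  (∀ p ∈ que, p.1 = PySem.List.pyGetD dp p.2 0 ∧ pvLo M j i ≤ p.2 ∧ p.2 ≤ i)
  ∧ que.Pairwise (fun a b => b.1 ≤ a.1 ∧ a.2 < b.2)
  ∧ (∀ t, pvLo M j i ≤ t → t ≤ i → ∃ p ∈ que, t ≤ p.2 ∧ PySem.List.pyGetD dp t 0 ≤ p.1)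

theorem pv_mem_dropWhile {α : Type} (p : α → Bool) (l : List α) (a : α)
    (ha : a ∈ l) (hp : p a = false) : a ∈ l.dropWhile p := by
  rw [← List.takeWhile_append_dropWhile (p := p) (l := l)] at ha
  rcases List.mem_append.mp ha with h | h
  · exact absurd (List.mem_takeWhile_imp h) (by simp [hp])
  · exact h

theorem pv_foldl_fix {α β : Type} (l : List α) (f : β → α → β) (init : β)
    (h : ∀ x ∈ l, f init x = init) : l.foldl f init = init := by
  induction l with
  | nil => rfl
  | cons a t ih =>
    simp only [List.foldl_cons, h a (by simp)]
    exact ih (fun x hx => h x (by simp [hx]))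

theorem pv_len_pyRange (a : Int) (n : Nat) : (PySem.List.pyRange a (a + n)).length = n := by
  induction n with
  | zero => rw [PySem.List.pyRange_one_eq_nil (by omega : (a + ((0:Nat):Int)) ≤ a)]; rfl
  | succ m ih =>
    have h : (a + ((m + 1 : Nat) : Int)) = (a + m) + 1 := by push_cast; ring
    rw [h, PySem.List.pyRange_one_succ_right (by omega)]
    simp [ih]

theorem pv_max_char (l : List Int) (m : Int) (hm : m ∈ l) (hmax : ∀ x ∈ l, x ≤ m) :
    (PySem.List.max? l (fun x => x)).getD 0 = m := by
  cases h : PySem.List.max? l (fun x => x) with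
  | none =>
    rw [PySem.List.max?_eq_none_iff] at h
    subst h; simp at hm
  | some m' =>
    have h1 : m' ∈ l := PySem.List.max?_mem h
    have h2 := PySem.List.max?_isMax h m hm
    simpa using le_antisymm (hmax m' h1) h2

theorem pv_slice_eq_map (xs : List Int) (n : Nat) : ∀ (a : Int), 0 ≤ a → a + n ≤ xs.length →
    PySem.List.slice xs (some a) (some (a + n)) =
      (PySem.List.pyRange a (a + n)).map (fun t => PySem.List.pyGetD xs t 0) := by
  induction n with
  | zero =>
    intro a ha _
    rw [PySem.List.slice_toNat xs ha (by omega),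
      PySem.List.pyRange_one_eq_nil (by omega : (a + ((0:Nat):Int)) ≤ a)]
    simp
  | succ m ih =>
    intro a ha hb
    have hlen : a.toNat < xs.length := by omega
    have h1 : (a + ((m + 1 : Nat) : Int)) = (a + 1) + m := by push_cast; ring
    have hcons : PySem.List.slice xs (some a) (some (a + ((m + 1 : Nat) : Int))) =
        PySem.List.pyGetD xs a 0 :: PySem.List.slice xs (some (a + 1)) (some ((a + 1) + m)) := by
      rw [PySem.List.slice_toNat xs ha (by omega), PySem.List.slice_toNat xs (by omega) (by omega)]
      rw [List.drop_eq_getElem_cons hlen]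
      have h2 : (a + ((m + 1 : Nat) : Int)).toNat - a.toNat = (((a + 1) + m).toNat - (a + 1).toNat) + 1 := by omega
      have h3 : (a + 1).toNat = a.toNat + 1 := by omega
      rw [h2, h3, List.take_succ_cons, PySem.List.pyGetD_eq_getElem xs 0 ha (by omega)]
    rw [hcons, h1, PySem.List.pyRange_one_cons (by omega : a < (a + 1) + (m : Int)),
      List.map_cons, ih (a + 1) (by omega) (by omega)]

theorem pv_popTail_split (v : Int) (que : List (Int × Int)) :
    ∃ s, que = pvPopTailLt v que ++ s ∧ ∀ p ∈ s, p.1 < v := by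
  refine ⟨(que.reverse.takeWhile (fun p => decide (p.1 < v))).reverse, ?_, ?_⟩
  · conv_lhs => rw [← que.reverse_reverse,
      ← List.takeWhile_append_dropWhile (p := fun p => decide (p.1 < v)) (l := que.reverse)]
    rw [List.reverse_append]; rfl
  · intro p hp
    have := List.mem_takeWhile_imp (List.mem_reverse.mp hp)
    simpa using this

theorem pv_popTail_ge (v : Int) (que : List (Int × Int))
    (hpw : que.Pairwise (fun a b => b.1 ≤ a.1 ∧ a.2 < b.2)) :
    ∀ p ∈ pvPopTailLt v que, v ≤ p.1 := by
  intro p hp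
  have hrev : p ∈ que.reverse.dropWhile (fun q => decide (q.1 < v)) := by
    simpa [pvPopTailLt, List.mem_reverse] using hp
  have hpw' : (que.reverse.dropWhile (fun q => decide (q.1 < v))).Pairwise
      (fun a b => a.1 ≤ b.1 ∧ b.2 < a.2) :=
    (List.pairwise_reverse.mpr hpw).sublist (List.dropWhile_sublist _)
  cases hq : que.reverse.dropWhile (fun q => decide (q.1 < v)) with
  | nil => rw [hq] at hrev; simp at hrev
  | cons h t =>
    have hh := List.head_dropWhile_not (fun q : Int × Int => decide (q.1 < v))
      (l := que.reverse) (by rw [hq]; simp)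
    simp only [hq, List.head_cons] at hh
    rw [hq] at hrev hpw'
    simp at hh
    rcases List.mem_cons.mp hrev with heq | hmem
    · subst heq; omega
    · have := (List.pairwise_cons.mp hpw').1 p hmem
      omega

-- the deque step: pops, append, front-trim preserve the invariant and leave the window
-- maximum at the front.
theorem pv_step (dp : List Int) (M : Int) (j : Int) (i : Int) (hM : 1 ≤ M) (hji : j ≤ i)
    (que : List (Int × Int)) (hinv : pvQInv dp M j (i - 1) que) :
    pvQInv dp M j i ((pvPopTailLt (PySem.List.pyGetD dp i 0) que ++ [(PySem.List.pyGetD dp i 0, i)]).dropWhile (fun p => decide (p.2 ≤ i - M)))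
    ∧ (((pvPopTailLt (PySem.List.pyGetD dp i 0) que ++ [(PySem.List.pyGetD dp i 0, i)]).dropWhile (fun p => decide (p.2 ≤ i - M))).headD (0, 0)).1 = pvWMax dp M j i := by
  obtain ⟨hmem, hpw, hdom⟩ := hinv
  set v := PySem.List.pyGetD dp i 0 with hv
  obtain ⟨s, hsplit, hslt⟩ := pv_popTail_split v que
  have hr_mem : ∀ p ∈ pvPopTailLt v que, p ∈ que := fun p hp => by
    rw [hsplit]; exact List.mem_append.mpr (Or.inl hp)
  have hr_pw : (pvPopTailLt v que).Pairwise (fun a b => b.1 ≤ a.1 ∧ a.2 < b.2) := by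
    rw [hsplit] at hpw; exact (List.pairwise_append.mp hpw).1
  have hr_ge := pv_popTail_ge v que hpw
  set que1 := pvPopTailLt v que ++ [(v, i)] with hq1
  have h1_pw : que1.Pairwise (fun a b => b.1 ≤ a.1 ∧ a.2 < b.2) := by
    rw [hq1, List.pairwise_append]
    refine ⟨hr_pw, by simp, ?_⟩
    intro p hp q hq; simp at hq; subst hq
    exact ⟨hr_ge p hp, by have := (hmem p (hr_mem p hp)).2.2; omega⟩
  have h1_mem : ∀ p ∈ que1, p.1 = PySem.List.pyGetD dp p.2 0 ∧ j ≤ p.2 ∧ p.2 ≤ i := by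
    intro p hp; rcases List.mem_append.mp hp with h | h
    · obtain ⟨ha, hb, hc⟩ := hmem p (hr_mem p h)
      have hb' : max j (i - 1 - M + 1) ≤ p.2 := hb
      exact ⟨ha, by omega, by omega⟩
    · simp at h; subst h; exact ⟨hv, hji, le_refl _⟩
  set que2 := que1.dropWhile (fun p => decide (p.2 ≤ i - M)) with hq2
  have hnew : ((v, i) : Int × Int) ∈ que2 :=
    pv_mem_dropWhile _ que1 _ (by rw [hq1]; simp) (by simp; omega)
  have h2_sub : ∀ p ∈ que2, p ∈ que1 := fun p hp => (List.dropWhile_sublist _).subset hp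
  have h2_pw : que2.Pairwise (fun a b => b.1 ≤ a.1 ∧ a.2 < b.2) :=
    h1_pw.sublist (List.dropWhile_sublist _)
  obtain ⟨h0, t0, hq20⟩ : ∃ h0 t0, que2 = h0 :: t0 := by
    cases hcase : que2 with
    | nil => rw [hcase] at hnew; simp at hnew
    | cons a b => exact ⟨a, b, rfl⟩
  have hh0 : ¬ (h0.2 ≤ i - M) := by
    have hh := List.head_dropWhile_not (fun p : Int × Int => decide (p.2 ≤ i - M))
      (l := que1) (by rw [← hq2, hq20]; simp)
    simp only [show que1.dropWhile (fun p : Int × Int => decide (p.2 ≤ i - M)) = h0 :: t0 from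
      hq2 ▸ hq20, List.head_cons] at hh
    simpa using hh
  have h2_lo : ∀ p ∈ que2, pvLo M j i ≤ p.2 := by
    intro p hp
    have hj2 : j ≤ p.2 := (h1_mem p (h2_sub p hp)).2.1
    rcases List.mem_cons.mp (hq20 ▸ hp) with heq | hmem'
    · subst heq; simp only [pvLo]; omega
    · have := (List.pairwise_cons.mp (hq20 ▸ h2_pw)).1 p hmem'
      simp only [pvLo]; omega
  have hdom2 : ∀ t, pvLo M j i ≤ t → t ≤ i →
      ∃ p ∈ que2, t ≤ p.2 ∧ PySem.List.pyGetD dp t 0 ≤ p.1 := by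
    intro t ht1 ht2
    by_cases hti : t = i
    · subst hti; exact ⟨(v, t), hnew, le_refl _, le_of_eq hv.symm⟩
    · have ht2' : t ≤ i - 1 := by omega
      have hlo' : pvLo M j (i - 1) ≤ t := by
        simp only [pvLo] at ht1 ⊢; omega
      obtain ⟨p, hp, htp, hdp⟩ := hdom t hlo' ht2'
      rw [hsplit] at hp
      rcases List.mem_append.mp hp with hpr | hps
      · refine ⟨p, ?_, htp, hdp⟩
        apply pv_mem_dropWhile _ que1 p (by rw [hq1]; exact List.mem_append.mpr (Or.inl hpr))
        simp only [pvLo] at ht1; simp; omega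
      · have := hslt p hps
        exact ⟨(v, i), hnew, by omega, by omega⟩
  have hh0mem : h0 ∈ que2 := by rw [hq20]; simp
  have hhead : h0.1 = pvWMax dp M j i := by
    have hm1 : h0.1 = PySem.List.pyGetD dp h0.2 0 := (h1_mem h0 (h2_sub _ hh0mem)).1
    have hwin_mem : h0.1 ∈ pvWin dp M j i := by
      refine List.mem_map.mpr ⟨h0.2, ?_, hm1.symm⟩
      rw [PySem.List.mem_pyRange_one]
      exact ⟨h2_lo h0 hh0mem, by have := (h1_mem h0 (h2_sub _ hh0mem)).2.2; omega⟩
    have hwin_le : ∀ x ∈ pvWin dp M j i, x ≤ h0.1 := by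
      intro x hx
      obtain ⟨t, htmem, rfl⟩ := List.mem_map.mp hx
      rw [PySem.List.mem_pyRange_one] at htmem
      obtain ⟨p, hp, htp, hdp⟩ := hdom2 t htmem.1 (by omega)
      rcases List.mem_cons.mp (hq20 ▸ hp) with heq | hmem'
      · subst heq; exact hdp
      · have := (List.pairwise_cons.mp (hq20 ▸ h2_pw)).1 p hmem'
        omega
    exact (pv_max_char _ h0.1 hwin_mem hwin_le).symm
  refine ⟨⟨?_, h2_pw, hdom2⟩, ?_⟩
  · intro p hp
    exact ⟨(h1_mem p (h2_sub p hp)).1, h2_lo p hp, (h1_mem p (h2_sub p hp)).2.2⟩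
  · rw [hq20]; simpa using hhead

-- the inner fold: newDP is the zero row with positions j+1 .. j+n overwritten by the
-- window-max values, and the deque satisfies its invariant.
theorem pv_inner (dp : List Int) (N : Int) (M : Int) (K : Int) (j : Int) (A : List Int)
    (hM : 1 ≤ M) (hj : 0 ≤ j) (hjK : j + 1 ≤ K) (hKN : K ≤ N) :
    ∀ n : Nat, (j + n ≤ N - K + j + 1) →
      ((PySem.List.pyRange j (j + n)).foldl (pvInnerA dp M j A)
          (List.replicate (N + 1).toNat 0, ([] : List (Int × Int)))).1 =
        List.replicate (j + 1).toNat 0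
          ++ (PySem.List.pyRange j (j + n)).map
              (fun i => pvWMax dp M j i + (j + 1) * PySem.List.pyGetD A i 0)
          ++ List.replicate ((N + 1).toNat - ((j + 1).toNat + n)) 0
      ∧ pvQInv dp M j (j + n - 1)
          ((PySem.List.pyRange j (j + n)).foldl (pvInnerA dp M j A)
            (List.replicate (N + 1).toNat 0, ([] : List (Int × Int)))).2 := by
  intro n
  induction n with
  | zero =>
    intro _
    have h0 : (j + ((0 : Nat) : Int)) = j := by push_cast; ring
    rw [h0, PySem.List.pyRange_one_eq_nil (le_refl j)]
    constructor
    · simp only [List.foldl_nil, List.map_nil, List.append_nil]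
      rw [← List.replicate_add]
      congr 1; omega
    · refine ⟨by simp, by simp, ?_⟩
      intro t ht1 ht2
      exfalso; simp only [pvLo] at ht1; omega
  | succ m ih =>
    intro hle
    have hle' : j + (m : Int) ≤ N - K + j + 1 := by push_cast at hle ⊢; omega
    obtain ⟨ih1, ih2⟩ := ih hle'
    have hsplitR : PySem.List.pyRange j (j + ((m + 1 : Nat) : Int)) =
        PySem.List.pyRange j (j + (m : Int)) ++ [j + (m : Int)] := by
      have h1 : (j + ((m + 1 : Nat) : Int)) = (j + (m : Int)) + 1 := by push_cast; ring
      rw [h1, PySem.List.pyRange_one_succ_right (by omega)]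
    rw [hsplitR, List.foldl_append]
    set st := (PySem.List.pyRange j (j + (m : Int))).foldl (pvInnerA dp M j A)
      (List.replicate (N + 1).toNat 0, ([] : List (Int × Int))) with hst
    have hinv' : pvQInv dp M j ((j + (m : Int)) - 1) st.2 := by
      have : (j + (m : Int) - 1) = j + (m : Int) - 1 := rfl
      exact ih2
    have hstep := pv_step dp M j (j + (m : Int)) hM (by omega) st.2 hinv'
    simp only [List.foldl_cons, List.foldl_nil]
    constructor
    · simp only [pvInnerA]
      rw [hstep.2, ih1]
      have hq1 : 1 ≤ (N + 1).toNat - ((j + 1).toNat + m) := by push_cast at hle; omega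
      have hlen : (List.replicate (j + 1).toNat (0 : Int)
          ++ (PySem.List.pyRange j (j + (m : Int))).map
              (fun i => pvWMax dp M j i + (j + 1) * PySem.List.pyGetD A i 0)).length
          = (j + 1).toNat + m := by
        simp
      rw [List.set_append, if_neg (by rw [hlen]; omega)]
      rw [hlen, show (j + (m : Int) + 1).toNat - ((j + 1).toNat + m) = 0 from by omega]
      rw [show (N + 1).toNat - ((j + 1).toNat + m) = ((N + 1).toNat - ((j + 1).toNat + (m + 1))) + 1 from by omega]
      rw [List.replicate_succ, List.set_cons_zero, List.map_append]
      simp [List.append_assoc]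
    · have hidx : (j + ((m + 1 : Nat) : Int) - 1) = j + (m : Int) := by push_cast; ring
      rw [hidx]
      simpa only [pvInnerA] using hstep.1

theorem pv_row_eq (N : Int) (M : Int) (K : Int) (A : List Int) (dp : List Int) (j : Int)
    (hM : 1 ≤ M) (hj : 0 ≤ j) (hjK : j + 1 ≤ K) (hKN : K ≤ N)
    (hlen : dp.length = (N + 1).toNat) :
    pvRowA N M K A dp j = pvRowB N M K A dp j := by
  have hn : (j + (((N - K + 1).toNat : Nat) : Int)) = N - K + j + 1 := by omega
  obtain ⟨h1, _⟩ := pv_inner dp N M K j A hM hj hjK hKN (N - K + 1).toNat (by omega)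
  unfold pvRowA pvRowB
  rw [← hn, h1]
  simp only [List.take_replicate, List.drop_replicate, List.length_map, pv_len_pyRange]
  rw [show min (j + 1).toNat (N + 1).toNat = (j + 1).toNat from by omega]
  congr 1
  · congr 1
    apply List.map_congr_left
    intro i hi
    rw [PySem.List.mem_pyRange_one] at hi
    have hiN : i ≤ N - 1 := by omega
    have hlo0 : 0 ≤ max j (i - M + 1) := le_trans hj (le_max_left _ _)
    have hmle : max j (i - M + 1) + ((((i + 1) - max j (i - M + 1)).toNat : Nat) : Int) = i + 1 := by
      omega
    rw [show some (i + 1) = some (max j (i - M + 1) + ((((i + 1) - max j (i - M + 1)).toNat : Nat) : Int)) from by rw [hmle]]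
    rw [pv_slice_eq_map dp _ _ hlo0 (by omega)]
    rw [hmle]
    rfl

theorem pv_fold_eq {α : Type} (l : List α) (f g : List Int → α → List Int)
    (P : List Int → Prop) (init : List Int) (h0 : P init)
    (h : ∀ x ∈ l, ∀ acc, P acc → f acc x = g acc x ∧ P (g acc x)) :
    l.foldl f init = l.foldl g init := by
  induction l generalizing init with
  | nil => rfl
  | cons a t ih =>
    have ha := h a (by simp) init h0
    simp only [List.foldl_cons, ha.1]
    exact ih _ ha.2 (fun x hx acc hacc => h x (by simp [hx]) acc hacc)

-- ===== VERDICT (by name: the statement is the Claim_ definition above) =====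
theorem calculate_max_total_score_spec : Claim_equal_calculate_max_total_score := by
  intro N M K A _ hpre
  obtain ⟨hN, hKA⟩ := hpre
  unfold Spec_calculate_max_total_score calculate_max_total_score calculate_max_total_score_alt
  by_cases hK1 : 1 ≤ K
  · by_cases hKN : K ≤ N
    · obtain ⟨hM, _⟩ := hKA hK1 hKN
      have hfold : (PySem.List.pyRange 0 K).foldl (pvRowA N M K A) (List.replicate (N + 1).toNat 0)
          = (PySem.List.pyRange 0 K).foldl (pvRowB N M K A) (List.replicate (N + 1).toNat 0) := by
        refine pv_fold_eq _ _ _ (fun dp => dp.length = (N + 1).toNat) _ (by simp) ?_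
        intro jx hjx acc hacc
        rw [PySem.List.mem_pyRange_one] at hjx
        refine ⟨pv_row_eq N M K A acc jx hM hjx.1 (by omega) hKN hacc, ?_⟩
        unfold pvRowB
        rw [show N - K + jx + 1 = jx + (((N - K + 1).toNat : Nat) : Int) from by omega]
        simp only [List.length_append, List.length_take, List.length_drop,
          List.length_replicate, List.length_map, pv_len_pyRange]
        omega
      rw [hfold]
    · rw [Int.not_le] at hKN
      have hA0 : (PySem.List.pyRange 0 K).foldl (pvRowA N M K A) (List.replicate (N + 1).toNat 0)
          = List.replicate (N + 1).toNat 0 := by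
        refine pv_foldl_fix _ _ _ (fun x hx => ?_)
        rw [PySem.List.mem_pyRange_one] at hx
        unfold pvRowA
        rw [PySem.List.pyRange_one_eq_nil (by omega : N - K + x + 1 ≤ x)]
        simp
      have hB0 : (PySem.List.pyRange 0 K).foldl (pvRowB N M K A) (List.replicate (N + 1).toNat 0)
          = List.replicate (N + 1).toNat 0 := by
        refine pv_foldl_fix _ _ _ (fun x hx => ?_)
        rw [PySem.List.mem_pyRange_one] at hx
        unfold pvRowB
        rw [PySem.List.pyRange_one_eq_nil (by omega : N - K + x + 1 ≤ x)]
        simp only [List.map_nil, List.length_nil, Nat.add_zero,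
          List.take_replicate, List.drop_replicate, List.append_nil]
        rw [← List.replicate_add]
        congr 1
        omega
      rw [hA0, hB0]
  · rw [Int.not_le] at hK1
    rw [PySem.List.pyRange_one_eq_nil (by omega : K ≤ 0)]
    rfl
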